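-- pv_equiv track=rewrite | github.com/joshleejosh/melodomatic | melodomatic/scale.py | parse_degree
-- ===== SOURCE A (Python) =====
-- def parse_degree(code):
--     """
--     For the given coded value, return degree, octave, and accidental as a 3-tuple.
--     See doc/07-pitch-code for specific notes on the coding format.
--     """
--     code = code.strip()
--     degree = 1
--     octave = 0
--     accidental = 0
--
--     i = 0
--     while i < len(code):
--         if code[i] == '-':
--             octave -= 1
--         elif code[i] == '+':
--             octave += 1
--         else:
--             break
--         i += 1
--
--     dbuf = ''
--     while i < len(code):
--         if code[i].isdigit():
--             dbuf += code[i]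
--         else:
--             break
--         i += 1
--     degree = 1
--     try:
--         degree = int(dbuf)
--     except ValueError:
--         pass
--
--     while i < len(code):
--         if code[i] == '-':
--             accidental -= 1
--         elif code[i] == '+':
--             accidental += 1
--         else:
--             break
--         i += 1
--
--     return (degree, octave, accidental)
-- ===== SOURCE B (Python) =====
-- def _span(s, pred):
--     """Length of the longest prefix of s whose characters all satisfy pred."""
--     for i, ch in enumerate(s):
--         if not pred(ch):
--             return i
--     return len(s)
--
--
-- def parse_degree(code):
--     s = code.strip()
--     i = _span(s, lambda c: c in '+-')
--     j = i + _span(s[i:], str.isdigit)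
--     k = j + _span(s[j:], lambda c: c in '+-')
--     head, digits, tail = s[:i], s[i:j], s[j:k]
--     return (int(digits) if digits else 1,
--             head.count('+') - head.count('-'),
--             tail.count('+') - tail.count('-'))
-- ===== Notes on version B (the rewrite author's own statement) =====
-- stated objective: idiomatic
-- what changed: Replaces the three index-advancing while loops with stateful counters by splitting the stripped string into three maximal spans (signs/digits/signs) and computing each component from its span with str.count and int().
import Mathlib
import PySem

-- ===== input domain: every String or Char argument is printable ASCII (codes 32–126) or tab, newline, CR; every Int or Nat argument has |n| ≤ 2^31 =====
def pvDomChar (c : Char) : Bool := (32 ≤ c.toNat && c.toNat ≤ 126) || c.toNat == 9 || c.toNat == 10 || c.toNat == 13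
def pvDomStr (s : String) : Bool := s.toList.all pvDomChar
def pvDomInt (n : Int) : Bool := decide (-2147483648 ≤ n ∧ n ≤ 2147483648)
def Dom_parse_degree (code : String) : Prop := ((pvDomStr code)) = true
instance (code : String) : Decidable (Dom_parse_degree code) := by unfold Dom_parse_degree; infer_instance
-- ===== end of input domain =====

-- B replaces A's three index-advancing stateful while loops by splitting the stripped
-- string into three maximal spans (signs/digits/signs) and computing each component
-- from its span with counting/parsing; objective: more idiomatic, same O(n) cost.

-- ===== PORT A =====
-- first/third while loop of A: '-' decrements, '+' increments, anything else breaks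
def pvSignLoop : List Char → Int → Int × List Char
  | [], n => (n, [])
  | c :: t, n =>
    if c == '-' then pvSignLoop t (n - 1)
    else if c == '+' then pvSignLoop t (n + 1)
    else (n, c :: t)

-- second while loop of A: append digits to dbuf, anything else breaks
def pvDigitLoop : List Char → List Char → List Char × List Char
  | [], d => (d, [])
  | c :: t, d => if PySem.Chars.isdigit c then pvDigitLoop t (d ++ [c]) else (d, c :: t)

def parse_degree (code : String) : Int × Int × Int :=
  let s := (PySem.Str.strip code).toList
  let p1 := pvSignLoop s 0                                   -- octave loop
  let p2 := pvDigitLoop p1.2 []                              -- dbuf loop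
  let degree := (PySem.Int.ofStr? (String.ofList p2.1)).getD 1   -- try: int(dbuf); except ValueError: degree stays 1
  let p3 := pvSignLoop p2.2 0                                -- accidental loop
  (degree, p1.1, p3.1)

-- ===== PORT B =====
-- _span(s, pred): length of the longest prefix of s all of whose chars satisfy pred
def pvSpan : List Char → (Char → Bool) → Nat
  | [], _ => 0
  | c :: t, p => if p c then pvSpan t p + 1 else 0

def parse_degree_alt (code : String) : Int × Int × Int :=
  let s := (PySem.Str.strip code).toList
  let i := pvSpan s (fun c => c == '+' || c == '-')
  let j := i + pvSpan (s.drop i) PySem.Chars.isdigit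
  let k := j + pvSpan (s.drop j) (fun c => c == '+' || c == '-')
  let head := s.take i                                       -- s[:i]  (exact: 0 ≤ i ≤ len s)
  let digits := (s.drop i).take (j - i)                      -- s[i:j] (exact: 0 ≤ i ≤ j ≤ len s)
  let tail := (s.drop j).take (k - j)                        -- s[j:k] (exact: 0 ≤ j ≤ k ≤ len s)
  let degree : Int := if digits.isEmpty then 1
    else (PySem.Int.ofStr? (String.ofList digits)).getD 1        -- int(digits); never fails on a nonempty digit string
  (degree,
   (PySem.Chars.count head ['+'] : Int) - (PySem.Chars.count head ['-'] : Int),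
   (PySem.Chars.count tail ['+'] : Int) - (PySem.Chars.count tail ['-'] : Int))

-- ===== PRECONDITION & SPEC =====
def Spec_parse_degree (code : String) (out : Int × Int × Int) : Prop := out = parse_degree_alt code
instance (code : String) (out : Int × Int × Int) : Decidable (Spec_parse_degree code out) := by unfold Spec_parse_degree; infer_instance

-- ===== CLAIM (what is proved, stated in full; the proofs are below) =====
def Claim_equal_parse_degree : Prop := ∀ (code : String), Dom_parse_degree code → Spec_parse_degree code (parse_degree code)

-- ===== LEMMAS AND PROOFS =====

theorem pvCount_go_single (c : Char) (l : List Char) (acc fuel : Nat) (h : l.length ≤ fuel) :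
    PySem.Chars.count.go [c] fuel l acc = acc + l.count c := by
  induction l generalizing acc fuel with
  | nil => cases fuel <;> simp [PySem.Chars.count.go]
  | cons x t ih =>
    cases fuel with
    | zero => simp at h
    | succ f =>
      simp only [List.length_cons, Nat.succ_le_succ_iff] at h
      by_cases hx : x = c
      · subst hx
        simp [PySem.Chars.count.go, List.isPrefixOf, ih _ _ h]
        omega
      · simp [PySem.Chars.count.go, List.isPrefixOf, Ne.symm hx, hx, ih _ _ h]

theorem pvCount_single (l : List Char) (c : Char) :
    PySem.Chars.count l [c] = l.count c := by
  simp [PySem.Chars.count, pvCount_go_single c l 0 l.length le_rfl]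

theorem pvSpan_take (l : List Char) (p : Char → Bool) :
    l.take (pvSpan l p) = l.takeWhile p := by
  induction l with
  | nil => rfl
  | cons c t ih =>
    by_cases hc : p c = true <;> simp [pvSpan, hc, ih]

theorem pvSpan_drop (l : List Char) (p : Char → Bool) :
    l.drop (pvSpan l p) = l.dropWhile p := by
  induction l with
  | nil => rfl
  | cons c t ih =>
    by_cases hc : p c = true <;> simp [pvSpan, hc, ih]

theorem pvSignLoop_eq (l : List Char) (n : Int) :
    pvSignLoop l n =
      (n + ((l.takeWhile (fun c => c == '+' || c == '-')).count '+' : Int)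
         - ((l.takeWhile (fun c => c == '+' || c == '-')).count '-' : Int),
       l.dropWhile (fun c => c == '+' || c == '-')) := by
  induction l generalizing n with
  | nil => simp [pvSignLoop]
  | cons c t ih =>
    by_cases hm : c = '-'
    · subst hm
      simp [pvSignLoop, ih]
      ring
    · by_cases hp : c = '+'
      · subst hp
        simp [pvSignLoop, ih]
        ring
      · simp [pvSignLoop, hm, hp]

theorem pvDigitLoop_eq (l d : List Char) :
    pvDigitLoop l d = (d ++ l.takeWhile PySem.Chars.isdigit, l.dropWhile PySem.Chars.isdigit) := by
  induction l generalizing d with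
  | nil => simp [pvDigitLoop]
  | cons c t ih =>
    by_cases hc : PySem.Chars.isdigit c = true <;>
      simp [pvDigitLoop, hc, ih]

-- ===== VERDICT (by name: the statement is the Claim_ definition above) =====
theorem parse_degree_spec : Claim_equal_parse_degree := by
  intro code _
  unfold Spec_parse_degree parse_degree parse_degree_alt
  simp only [pvSignLoop_eq, pvDigitLoop_eq, pvSpan_take, pvSpan_drop, pvCount_single,
    List.nil_append, Nat.add_sub_cancel_left]
  set s := (PySem.Str.strip code).toList with hs
  set r1 := s.dropWhile (fun c => c == '+' || c == '-') with hr1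
  have hdd : s.drop (pvSpan s (fun c => c == '+' || c == '-')
      + pvSpan r1 PySem.Chars.isdigit)
      = r1.dropWhile PySem.Chars.isdigit := by
    rw [← List.drop_drop, pvSpan_drop s, ← hr1, pvSpan_drop]
  rw [hdd]
  refine Prod.ext ?_ (Prod.ext ?_ ?_)
  · dsimp only
    by_cases hd : (List.takeWhile PySem.Chars.isdigit r1).isEmpty = true
    · rw [if_pos hd]
      rw [List.isEmpty_iff] at hd
      rw [hd]
      rfl
    · rw [if_neg hd]
  · dsimp only
    omega
  · dsimp only
    omega
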